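-- pv_equiv track=rewrite | github.com/HyeonJuSon/BSJJ_Algorithm_Study | 220106~220401(1-10주차)/220127-220209(4주차)/PRG_LV2_프렌즈4블록/Solution_LV2_프렌즈4블록_정우영_solved.py | solution
-- ===== SOURCE A (Python) =====
-- def check(original, board, y, x, deleteLocation):
--     if original == board[y][x + 1] and original == board[y + 1][x] and original == board[y + 1][x + 1]:
--         deleteLocation.add((y, x))
--         deleteLocation.add((y, x + 1))
--         deleteLocation.add((y + 1, x))
--         deleteLocation.add((y + 1, x + 1))
--
-- def solution(m, n, board):
--     answer = 0
--     for y in range(m):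
--         board[y] = list(board[y])
--
--     while True:
--         deleteLocation = set()
--
--         # 블럭 삭제할 좌표 구하기
--         for y in range(0, m - 1):
--             for x in range(0, n - 1):
--                 # 블럭이 없는(0) 좌표는 스킵
--                 if board[y][x] == 0:
--                     continue
--
--                 original = board[y][x]
--                 # 조건에 맞는 블럭 좌표인지 확인
--                 check(original, board, y, x, deleteLocation)
--
--         # 삭제할 블럭이 없으면 반복문 종료
--         if not len(deleteLocation):
--             break
--
--         # 삭제한 블록 개수 플러스
--         answer += len(deleteLocation)
--
--         # 블럭 삭제
--         for y, x in deleteLocation: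
--             board[y][x] = 0
--
--         # 블럭 재배치
--         for y in reversed(range(m - 1)):
--             for x in reversed(range(n)):
--                 # 빈 좌표는 스킵
--                 if board[y][x] == 0:
--                     continue
--
--                 i = y
--                 while True:
--                     # 좌표가 구역내이고, 기준 좌표 아래가 비어있으면
--                     if i + 1 < m and board[i + 1][x] == 0:
--                         board[i + 1][x], board[i][x] = board[i][x], 0
--                         i = i + 1
--                     # 아니면 종료
--                     else:
--                         break
--     return answer
-- ===== SOURCE B (Python) =====
-- # B: same round structure (detect 2x2 -> count -> settle), but deletion and gravity are done
-- # in one per-column compaction (zeros on top, kept blocks below, order preserved) instead of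
-- # A's cell-by-cell bubble-down swapping; B does not mutate the caller's board (A does).
-- def solution(m, n, board):
--     grid = [list(row) for row in board]
--     total = 0
--     while True:
--         marks = set()
--         for y in range(m - 1):
--             for x in range(n - 1):
--                 v = grid[y][x]
--                 if v != 0 and v == grid[y][x + 1] == grid[y + 1][x] == grid[y + 1][x + 1]:
--                     marks.update(((y, x), (y, x + 1), (y + 1, x), (y + 1, x + 1)))
--         if not marks:
--             return total
--         total += len(marks)
--         for x in range(n):
--             col = [grid[y][x] for y in range(m) if (y, x) not in marks and grid[y][x] != 0]
--             pad = m - len(col)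
--             for y in range(m):
--                 grid[y][x] = col[y - pad] if y >= pad else 0
-- ===== Notes on version B (the rewrite author's own statement) =====
-- stated objective: simpler
-- what changed: A deletes marked cells and then settles each block with a per-cell bubble-down swap loop scanned right-to-left and bottom-up; B fuses deletion and gravity into one per-column compaction that rebuilds every column as zeros-on-top followed by the surviving blocks in order, with no swapping.
import Mathlib
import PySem

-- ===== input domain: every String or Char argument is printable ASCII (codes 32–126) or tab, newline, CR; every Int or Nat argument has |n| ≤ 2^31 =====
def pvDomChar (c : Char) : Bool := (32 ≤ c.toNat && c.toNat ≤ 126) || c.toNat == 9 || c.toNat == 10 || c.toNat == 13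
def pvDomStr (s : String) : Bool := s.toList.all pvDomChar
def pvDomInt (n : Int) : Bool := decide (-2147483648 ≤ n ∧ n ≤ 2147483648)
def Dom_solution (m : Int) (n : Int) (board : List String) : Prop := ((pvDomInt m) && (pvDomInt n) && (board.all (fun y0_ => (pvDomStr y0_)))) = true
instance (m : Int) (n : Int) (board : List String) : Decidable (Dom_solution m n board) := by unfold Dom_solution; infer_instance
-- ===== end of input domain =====

-- B replaces A's per-cell bubble-down gravity by a single per-column compaction fused with the
-- deletion step (same detection and same count); equivalence is about the RETURN value only —
-- A mutates its `board` argument in place, B does not.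
-- Cells are `Option Char`: `none` is Python's int 0 marker, `some c` a block character.

-- ===== PORT A =====
-- board[y][x] (indices are produced by range/… and are always ≥ 0 here, so .toNat is exact)
def cellGet (g : List (List (Option Char))) (y x : Int) : Option Char :=
  (g.getD y.toNat []).getD x.toNat none

-- board[y][x] = v (same nonnegative-index remark)
def cellSet (g : List (List (Option Char))) (y x : Int) (v : Option Char) :
    List (List (Option Char)) :=
  g.set y.toNat ((g.getD y.toNat []).set x.toNat v)

-- def check(original, board, y, x, deleteLocation)
def checkA (orig : Option Char) (g : List (List (Option Char))) (y x : Int)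
    (s : PySem.Set (Int × Int)) : PySem.Set (Int × Int) :=
  if orig = cellGet g y (x + 1) ∧ orig = cellGet g (y + 1) x ∧ orig = cellGet g (y + 1) (x + 1) then
    PySem.Set.add (PySem.Set.add (PySem.Set.add (PySem.Set.add s (y, x)) (y, x + 1)) (y + 1, x)) (y + 1, x + 1)
  else s

-- the deleteLocation-building double loop of one round
def detectA (m n : Int) (g : List (List (Option Char))) : PySem.Set (Int × Int) :=
  (PySem.List.pyRange 0 (m - 1) 1).foldl (fun s y =>
    (PySem.List.pyRange 0 (n - 1) 1).foldl (fun s x =>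
      if cellGet g y x = none then s
      else checkA (cellGet g y x) g y x s) s) PySem.Set.empty

-- the inner `while True` drop loop: swap downwards while the cell below is 0
def bubbleA (m : Int) (g : List (List (Option Char))) (x i : Int) :
    List (List (Option Char)) :=
  if h : i + 1 < m ∧ cellGet g (i + 1) x = none then
    bubbleA m (cellSet (cellSet g (i + 1) x (cellGet g i x)) i x none) x (i + 1)
  else g
termination_by (m - i).toNat
decreasing_by omega

-- `for y in reversed(range(m-1)): for x in reversed(range(n)): …`
def gravityA (m n : Int) (g : List (List (Option Char))) : List (List (Option Char)) :=
  ((PySem.List.pyRange 0 (m - 1) 1).reverse).foldl (fun g y =>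
    ((PySem.List.pyRange 0 n 1).reverse).foldl (fun g x =>
      if cellGet g y x = none then g else bubbleA m g x y) g) g

-- `for y, x in deleteLocation: board[y][x] = 0` (order-independent: every write stores 0)
def zeroOutA (g : List (List (Option Char))) (s : PySem.Set (Int × Int)) :
    List (List (Option Char)) :=
  s.foldl (fun g p => cellSet g p.1 p.2 none) g

-- the `while True:` loop; fuel m*n+1 is exact on Pre_: every productive round zeroes ≥ 4
-- of the ≤ m*n non-zero cells of the m×n box, so at most m*n rounds act before the break
def loopA (m n : Int) : Nat → List (List (Option Char)) → Int → Int
  | 0, _, acc => acc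
  | f + 1, g, acc =>
    let s := detectA m n g
    if PySem.Set.len s = 0 then acc
    else loopA m n f (gravityA m n (zeroOutA g s)) (acc + PySem.Set.len s)

def solution (m : Int) (n : Int) (board : List String) : Int :=
  -- `board[y] = list(board[y])` (rows ≥ m are converted too; they are never read)
  loopA m n (m.toNat * n.toNat + 1) (board.map (fun r => r.toList.map some)) 0

-- ===== PORT B =====
-- the `marks`-building double loop of one round of B
def detectB (m n : Int) (g : List (List (Option Char))) : PySem.Set (Int × Int) :=
  (PySem.List.pyRange 0 (m - 1) 1).foldl (fun s y =>
    (PySem.List.pyRange 0 (n - 1) 1).foldl (fun s x =>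
      let v := cellGet g y x
      if v ≠ none ∧ v = cellGet g y (x + 1) ∧ v = cellGet g (y + 1) x ∧ v = cellGet g (y + 1) (x + 1) then
        PySem.Set.update s [(y, x), (y, x + 1), (y + 1, x), (y + 1, x + 1)]
      else s) s) PySem.Set.empty

-- body of B's per-column loop: keep unmarked non-zero cells, pad zeros on top
-- (`col[y - pad]` is always in range here, hence the total pyGetD)
def settleColB (m : Int) (marks : PySem.Set (Int × Int)) (g : List (List (Option Char)))
    (x : Int) : List (List (Option Char)) :=
  let col := ((PySem.List.pyRange 0 m 1).filter (fun y =>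
      !(PySem.Set.contains marks (y, x)) && !(cellGet g y x == none))).map (fun y => cellGet g y x)
  let pad : Int := m - col.length
  (PySem.List.pyRange 0 m 1).foldl (fun g y =>
    cellSet g y x (if pad ≤ y then PySem.List.pyGetD col (y - pad) none else none)) g

-- fused delete + gravity: `for x in range(n): …`
def compactB (m n : Int) (g : List (List (Option Char))) (marks : PySem.Set (Int × Int)) :
    List (List (Option Char)) :=
  (PySem.List.pyRange 0 n 1).foldl (settleColB m marks) g

def loopB (m n : Int) : Nat → List (List (Option Char)) → Int → Int
  | 0, _, acc => acc
  | f + 1, g, acc =>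
    let s := detectB m n g
    if PySem.Set.len s = 0 then acc
    else loopB m n f (compactB m n g s) (acc + PySem.Set.len s)

def solution_alt (m : Int) (n : Int) (board : List String) : Int :=
  loopB m n (m.toNat * n.toNat + 1) (board.map (fun r => r.toList.map some)) 0

-- ===== PRECONDITION & SPEC =====
-- Pre_ excludes exactly the inputs on which A raises IndexError: m exceeding the number of
-- rows (with m ≥ 1), or some of the first m rows shorter than n while the 2×2 scan runs.
def Pre_solution (m : Int) (n : Int) (board : List String) : Prop :=
  (1 ≤ m → m ≤ (board.length : Int)) ∧
  ((2 ≤ m ∧ 2 ≤ n) → ∀ r ∈ board.take m.toNat, n ≤ (r.toList.length : Int))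
instance (m : Int) (n : Int) (board : List String) : Decidable (Pre_solution m n board) := by
  unfold Pre_solution; infer_instance

def pvWitness_solution : Int × Int × List String := (2, 2, ["AB", "AB"])

def Spec_solution (m : Int) (n : Int) (board : List String) (out : Int) : Prop :=
  out = solution_alt m n board
instance (m : Int) (n : Int) (board : List String) (out : Int) : Decidable (Spec_solution m n board out) := by
  unfold Spec_solution; infer_instance

-- ===== CLAIM (what is proved, stated in full; the proofs are below) =====
def Claim_equal_solution : Prop := ∀ (m : Int) (n : Int) (board : List String),
  Dom_solution m n board → Pre_solution m n board → Spec_solution m n board (solution m n board)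

-- ===== LEMMAS AND PROOFS =====

-- proof-side notions -------------------------------------------------------
-- well-formedness carried through the loop: at least m rows, first m rows of length ≥ n
def WF (m n : Int) (g : List (List (Option Char))) : Prop :=
  m.toNat ≤ g.length ∧ ∀ y < m.toNat, n.toNat ≤ (g.getD y []).length

-- agreement of two grids on the m×n box (the only cells either round ever reads)
def BoxEq (m n : Int) (g g' : List (List (Option Char))) : Prop :=
  ∀ y < m.toNat, ∀ x < n.toNat, cellGet g ↑y ↑x = cellGet g' ↑y ↑x

-- column x of g, rows k..M-1 (top to bottom)
def colFrom (g : List (List (Option Char))) (M k x : Nat) : List (Option Char) :=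
  (List.range' k (M - k)).map (fun (y : Nat) => cellGet g ((y : Int)) ((x : Int)))

-- settled form of a column: zeros on top, the non-zero cells below, order kept
def compactC (c : List (Option Char)) : List (Option Char) :=
  List.replicate (c.length - (c.filter Option.isSome).length) none ++ c.filter Option.isSome


-- basic cell lemmas ---------------------------------------------------------
theorem getD_set_list (g : List (List (Option Char))) (i j : Nat) (r : List (Option Char)) :
    (g.set i r).getD j [] = if i = j ∧ i < g.length then r else g.getD j [] := by
  by_cases h : i = j ∧ i < g.length
  · obtain ⟨rfl, hl⟩ := h
    simp [List.getD, List.getElem?_set, hl]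
  · simp only [if_neg h, List.getD]
    rcases Decidable.em (i = j) with rfl | hne
    · have : ¬ i < g.length := fun hl => h ⟨rfl, hl⟩
      rw [List.getElem?_set]
      simp [this, List.getElem?_eq_none_iff.mpr (Nat.le_of_not_lt this)]
    · rw [List.getElem?_set_ne hne]

theorem length_cellSet (g : List (List (Option Char))) (y x : Int) (v : Option Char) :
    (cellSet g y x v).length = g.length := by simp [cellSet]

theorem rowlen_cellSet (g : List (List (Option Char))) (y x : Int) (v : Option Char) (j : Nat) :
    ((cellSet g y x v).getD j []).length = (g.getD j []).length := by
  unfold cellSet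
  rw [getD_set_list]
  split_ifs with h
  · rw [List.length_set, h.1]
  · rfl

theorem cellGet_cellSet_self (g : List (List (Option Char))) (y x : Nat) (v : Option Char)
    (hy : y < g.length) (hx : x < (g.getD y []).length) :
    cellGet (cellSet g ↑y ↑x v) ↑y ↑x = v := by
  have hrow : g.getD y [] = g[y] := List.getD_eq_getElem g [] hy
  simp only [cellGet, cellSet, Int.toNat_natCast]
  rw [getD_set_list, if_pos ⟨rfl, hy⟩]
  rw [hrow] at hx
  simp [List.getD, List.getElem?_eq_getElem hy, List.getElem?_set_self hx]

theorem cellGet_cellSet_ne (g : List (List (Option Char))) (y x y' x' : Nat) (v : Option Char)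
    (h : y' ≠ y ∨ x' ≠ x) :
    cellGet (cellSet g ↑y ↑x v) ↑y' ↑x' = cellGet g ↑y' ↑x' := by
  simp only [cellGet, cellSet, Int.toNat_natCast]
  rw [getD_set_list]
  rcases Decidable.em (y = y') with rfl | hne
  · have hx : x' ≠ x := by tauto
    split_ifs with hl
    · simp [List.getD]
      rw [List.getElem?_set_ne (by omega)]
    · rfl
  · simp [hne]

-- detection ------------------------------------------------------------------
theorem detect_congr (m n : Int) (g g' : List (List (Option Char)))
    (hbox : BoxEq m n g g') (hm : 2 ≤ m) (hn : 2 ≤ n) :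
    detectA m n g = detectB m n g' := by
  unfold detectA detectB
  apply PySem.List.foldl_congr_mem
  intro s y hy
  apply PySem.List.foldl_congr_mem
  intro s x hx
  rw [PySem.List.mem_pyRange_one] at hy hx
  have hcell : ∀ (a b : Int), 0 ≤ a → a < m → 0 ≤ b → b < n → cellGet g a b = cellGet g' a b := by
    intro a b ha ham hb hbn
    have : a = ((a.toNat : Nat) : Int) := by omega
    rw [this]
    have hb' : b = ((b.toNat : Nat) : Int) := by omega
    rw [hb']
    exact hbox a.toNat (by omega) b.toNat (by omega)
  unfold checkA
  rw [hcell y x (by omega) (by omega) (by omega) (by omega),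
      hcell y (x+1) (by omega) (by omega) (by omega) (by omega),
      hcell (y+1) x (by omega) (by omega) (by omega) (by omega),
      hcell (y+1) (x+1) (by omega) (by omega) (by omega) (by omega)]
  simp only [ne_eq]
  by_cases hv : cellGet g' y x = none
  · simp [hv]
  · rw [if_neg hv]
    by_cases hc : cellGet g' y x = cellGet g' y (x+1) ∧ cellGet g' y x = cellGet g' (y+1) x ∧
        cellGet g' y x = cellGet g' (y+1) (x+1)
    · rw [if_pos hc, if_pos ⟨hv, hc⟩]
      rfl
    · rw [if_neg hc, if_neg (by tauto)]

theorem detect_degenerate (m n : Int) (g : List (List (Option Char))) (h : m ≤ 1 ∨ n ≤ 1) :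
    detectA m n g = PySem.Set.empty ∧ detectB m n g = PySem.Set.empty := by
  unfold detectA detectB
  rcases h with h | h
  · have e0 : PySem.List.pyRange 0 (m - 1) 1 = [] := PySem.List.pyRange_one_eq_nil (by omega)
    rw [e0]
    exact ⟨rfl, rfl⟩
  · have e1 : PySem.List.pyRange 0 (n - 1) 1 = [] := PySem.List.pyRange_one_eq_nil (by omega)
    rw [e1]
    simp only [List.foldl_nil]
    simp [PySem.List.foldl_ignore]

-- dimension bookkeeping ------------------------------------------------------
-- `Dims g h`: h has the same row count and row lengths as g (all grid writes preserve this)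
def Dims (g h : List (List (Option Char))) : Prop :=
  h.length = g.length ∧ ∀ j : Nat, (h.getD j []).length = (g.getD j []).length

theorem dims_refl (g : List (List (Option Char))) : Dims g g := ⟨rfl, fun _ => rfl⟩

theorem dims_trans {g h k : List (List (Option Char))} (h1 : Dims g h) (h2 : Dims h k) :
    Dims g k := ⟨h2.1.trans h1.1, fun j => (h2.2 j).trans (h1.2 j)⟩

theorem dims_cellSet (g : List (List (Option Char))) (y x : Int) (v : Option Char) :
    Dims g (cellSet g y x v) :=
  ⟨length_cellSet g y x v, fun j => rowlen_cellSet g y x v j⟩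

theorem dims_foldl {α : Type} (l : List α) (f : List (List (Option Char)) → α → List (List (Option Char)))
    (hf : ∀ g a, a ∈ l → Dims g (f g a)) (g : List (List (Option Char))) :
    Dims g (l.foldl f g) := by
  induction l generalizing g with
  | nil => exact dims_refl g
  | cons a t ih =>
    exact dims_trans (hf g a (by simp)) (ih (fun g' b hb => hf g' b (by simp [hb])) (f g a))

theorem dims_bubble (m : Int) (g : List (List (Option Char))) (x i : Int) :
    Dims g (bubbleA m g x i) := by
  induction g, i using bubbleA.induct m x with
  | case1 g i h ih =>
    rw [bubbleA, dif_pos h]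
    exact dims_trans (dims_trans (dims_cellSet _ _ _ _) (dims_cellSet _ _ _ _)) ih
  | case2 g i h => rw [bubbleA, dif_neg h]; exact dims_refl g

theorem WF_of_dims (m n : Int) (g h : List (List (Option Char))) (hwf : WF m n g)
    (hd : Dims g h) : WF m n h := by
  refine ⟨hd.1 ▸ hwf.1, fun y hy => ?_⟩
  rw [hd.2 y]
  exact hwf.2 y hy

theorem dims_zeroOut (g : List (List (Option Char))) (s : PySem.Set (Int × Int)) :
    Dims g (zeroOutA g s) :=
  dims_foldl s _ (fun g' p _ => dims_cellSet g' p.1 p.2 none) g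

theorem dims_gravity (m n : Int) (g : List (List (Option Char))) :
    Dims g (gravityA m n g) := by
  unfold gravityA
  refine dims_foldl _ _ (fun g' y _ => ?_) g
  refine dims_foldl _ _ (fun g'' x _ => ?_) g'
  split
  · exact dims_refl g''
  · exact dims_bubble m g'' x y

theorem dims_compact (m n : Int) (g : List (List (Option Char))) (s : PySem.Set (Int × Int)) :
    Dims g (compactB m n g s) := by
  unfold compactB
  refine dims_foldl _ _ (fun g' x _ => ?_) g
  unfold settleColB
  exact dims_foldl _ _ (fun g'' y _ => dims_cellSet g'' y x _) g'

-- settled columns ------------------------------------------------------------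
-- a column suffix that is already settled: zeros on top, blocks below
def IsComp (c : List (Option Char)) : Prop :=
  ∃ z vals, c = List.replicate z none ++ vals ∧ ∀ v ∈ vals, v.isSome = true

theorem filter_isSome_shape (z : Nat) (vals : List (Option Char))
    (h : ∀ v ∈ vals, v.isSome = true) :
    (List.replicate z (none : Option Char) ++ vals).filter Option.isSome = vals := by
  rw [List.filter_append, List.filter_replicate, List.filter_eq_self.mpr h]
  simp

theorem compactC_shape (z : Nat) (vals : List (Option Char))
    (h : ∀ v ∈ vals, v.isSome = true) :
    compactC (List.replicate z none ++ vals) = List.replicate z none ++ vals := by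
  unfold compactC
  rw [filter_isSome_shape z vals h]
  have : (List.replicate z (none : Option Char) ++ vals).length - vals.length = z := by
    simp
  rw [this]

theorem compactC_eq_of_IsComp {c : List (Option Char)} (h : IsComp c) : compactC c = c := by
  obtain ⟨z, vals, rfl, hv⟩ := h
  exact compactC_shape z vals hv

theorem IsComp_compactC (c : List (Option Char)) : IsComp (compactC c) :=
  ⟨c.length - (c.filter Option.isSome).length, c.filter Option.isSome, rfl,
    fun _ hv => List.of_mem_filter hv⟩

theorem length_compactC (c : List (Option Char)) : (compactC c).length = c.length := by
  have := List.length_filter_le Option.isSome c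
  simp [compactC]
  omega

theorem compactC_cons_none (c : List (Option Char)) :
    compactC (none :: c) = none :: compactC c := by
  unfold compactC
  have hf : (none :: c).filter Option.isSome = c.filter Option.isSome := by
    simp [List.filter_cons]
  rw [hf]
  have := List.length_filter_le Option.isSome c
  rw [show (none :: c).length - (c.filter Option.isSome).length
      = (c.length - (c.filter Option.isSome).length) + 1 from by simp; omega]
  rfl

theorem compactC_some_shape (a : Char) (z : Nat) (vals : List (Option Char))
    (h : ∀ v ∈ vals, v.isSome = true) :
    compactC (some a :: (List.replicate z none ++ vals)) = List.replicate z none ++ some a :: vals := by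
  unfold compactC
  have hf : (some a :: (List.replicate z none ++ vals)).filter Option.isSome = some a :: vals := by
    rw [List.filter_cons]
    simp [filter_isSome_shape z vals h]
  rw [hf]
  rw [show (some a :: (List.replicate z none ++ vals)).length - (some a :: vals).length = z from by
    simp]

theorem filter_compactC (c : List (Option Char)) :
    (compactC c).filter Option.isSome = c.filter Option.isSome := by
  unfold compactC
  exact filter_isSome_shape _ _ (fun _ hv => List.of_mem_filter hv)

theorem compactC_append_compactC (a b : List (Option Char)) :
    compactC (a ++ compactC b) = compactC (a ++ b) := by
  have h1 : (a ++ compactC b).filter Option.isSome = (a ++ b).filter Option.isSome := by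
    rw [List.filter_append, List.filter_append, filter_compactC]
  have h2 : (a ++ compactC b).length = (a ++ b).length := by
    simp [length_compactC]
  have e : ∀ c : List (Option Char),
      compactC c = List.replicate (c.length - (c.filter Option.isSome).length) none ++ c.filter Option.isSome :=
    fun _ => rfl
  rw [e (a ++ compactC b), e (a ++ b), h1, h2]

theorem IsComp_short (c : List (Option Char)) (h : c.length ≤ 1) : IsComp c := by
  match c, h with
  | [], _ => exact ⟨0, [], rfl, by simp⟩
  | [none], _ => exact ⟨1, [], by simp, by simp⟩
  | [some a], _ => exact ⟨0, [some a], rfl, by simp⟩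

theorem IsComp_tail {c : Option Char} {rest : List (Option Char)}
    (h : IsComp (c :: rest)) : IsComp rest := by
  obtain ⟨z, vals, he, hv⟩ := h
  match z, he with
  | 0, he =>
    simp at he
    exact ⟨0, rest, by simp, fun v hv' => hv v (by rw [← he]; simp [hv'])⟩
  | z + 1, he =>
    rw [List.replicate_succ, List.cons_append] at he
    exact ⟨z, vals, (List.cons.injEq _ _ _ _).mp he |>.2, hv⟩

-- column suffix access -------------------------------------------------------
theorem colFrom_cons (g : List (List (Option Char))) (M k x : Nat) (h : k < M) :
    colFrom g M k x = cellGet g ↑k ↑x :: colFrom g M (k + 1) x := by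
  unfold colFrom
  rw [show M - k = (M - (k + 1)) + 1 from by omega, List.range'_succ]
  rfl

theorem colFrom_congr (g g' : List (List (Option Char))) (M k x : Nat)
    (h : ∀ y, k ≤ y → y < M → cellGet g ↑y ↑x = cellGet g' ↑y ↑x) :
    colFrom g M k x = colFrom g' M k x := by
  unfold colFrom
  apply List.map_congr_left
  intro y hy
  rw [List.mem_range'] at hy
  obtain ⟨i, hi, rfl⟩ := hy
  exact h _ (by omega) (by omega)

theorem colFrom_split (g : List (List (Option Char))) (M k x : Nat) (h : k ≤ M) :
    colFrom g M 0 x = colFrom g k 0 x ++ colFrom g M k x := by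
  unfold colFrom
  rw [← List.map_append]
  congr 1
  have := List.range'_append (s := 0) (m := k) (n := M - k) (step := 1)
  simp only [Nat.one_mul, Nat.mul_one, Nat.zero_add] at this
  simp only [Nat.sub_zero]
  rw [this]
  congr 1
  omega

theorem length_colFrom (g : List (List (Option Char))) (M k x : Nat) :
    (colFrom g M k x).length = M - k := by
  simp [colFrom]

theorem colFrom_getD (g : List (List (Option Char))) (M x y : Nat) (h : y < M) :
    (colFrom g M 0 x).getD y none = cellGet g ↑y ↑x := by
  unfold colFrom
  rw [Nat.sub_zero, ← List.range_eq_range']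
  exact PySem.List.getD_map_range _ M y none h

-- deletion: cell description of A's zeroing loop -----------------------------
theorem zeroOut_cells (m n : Int) (s : List (Int × Int))
    (hs : ∀ p ∈ s, 0 ≤ p.1 ∧ p.1 < m ∧ 0 ≤ p.2 ∧ p.2 < n) :
    ∀ (g : List (List (Option Char))), WF m n g → ∀ (y x : Nat), y < m.toNat → x < n.toNat →
      cellGet (zeroOutA g s) ↑y ↑x = if ((y : Int), (x : Int)) ∈ s then none else cellGet g ↑y ↑x := by
  induction s with
  | nil => intro g _ y x _ _; simp [zeroOutA]
  | cons p t ih =>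
    intro g hwf y x hy hx
    have hp := hs p (by simp)
    have hstep : zeroOutA g (p :: t) = zeroOutA (cellSet g p.1 p.2 none) t := rfl
    rw [hstep, ih (fun q hq => hs q (by simp [hq])) _
      (WF_of_dims m n g _ hwf (dims_cellSet g p.1 p.2 none)) y x hy hx]
    by_cases ht : ((y : Int), (x : Int)) ∈ t
    · simp [ht]
    · rw [if_neg ht]
      by_cases hpe : ((y : Int), (x : Int)) = p
      · rw [if_pos (by simp [← hpe])]
        rw [← hpe]
        exact cellGet_cellSet_self g y x none (by have := hwf.1; omega)
          (by have := hwf.2 y hy; omega)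
      · rw [if_neg (fun hmem => by
          rcases List.mem_cons.mp hmem with h | h
          · exact hpe h
          · exact ht h)]
        have h1 : p.1 = ((p.1.toNat : Nat) : Int) := by omega
        have h2 : p.2 = ((p.2.toNat : Nat) : Int) := by omega
        rw [h1, h2]
        apply cellGet_cellSet_ne
        by_cases hyy : y = p.1.toNat
        · right
          intro hxx
          apply hpe
          rw [Prod.ext_iff]
          exact ⟨by dsimp only; omega, by dsimp only; omega⟩
        · left; exact hyy

-- A's bubble-down loop settles one cell into an already-settled column suffix --
theorem bubble_col (m n : Int) (hm1 : 1 ≤ m) (x : Nat) (hxn : x < n.toNat) :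
    ∀ (z : Nat) (g : List (List (Option Char))) (i : Nat), WF m n g → i < m.toNat →
    ∀ (a : Char) (vals : List (Option Char)), (∀ v ∈ vals, v.isSome = true) →
    colFrom g m.toNat i x = some a :: (List.replicate z none ++ vals) →
    colFrom (bubbleA m g ↑x ↑i) m.toNat i x = List.replicate z none ++ some a :: vals ∧
    (∀ (y' x' : Nat), (y' < i ∨ x' ≠ x) → cellGet (bubbleA m g ↑x ↑i) ↑y' ↑x' = cellGet g ↑y' ↑x') := by
  have hMm : ((m.toNat : Nat) : Int) = m := by omega
  intro z
  induction z with
  | zero =>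
    intro g i hwf hi a vals hv hcol
    rw [colFrom_cons g m.toNat i x hi] at hcol
    simp only [List.replicate, List.nil_append] at hcol
    have hhead : cellGet g ↑i ↑x = some a := (List.cons.injEq _ _ _ _).mp hcol |>.1
    have htail : colFrom g m.toNat (i + 1) x = vals := (List.cons.injEq _ _ _ _).mp hcol |>.2
    have hguard : ¬((↑i : Int) + 1 < m ∧ cellGet g (↑i + 1) ↑x = none) := by
      match vals, htail with
      | [], htail =>
        have := length_colFrom g m.toNat (i + 1) x
        rw [htail] at this
        simp at this
        intro hcon
        omega
      | w :: ws, htail =>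
        have hlen := length_colFrom g m.toNat (i + 1) x
        rw [htail] at hlen
        simp at hlen
        have hi1 : i + 1 < m.toNat := by omega
        have : cellGet g ↑(i + 1) ↑x = w := by
          have := colFrom_cons g m.toNat (i + 1) x hi1
          rw [htail] at this
          exact ((List.cons.injEq _ _ _ _).mp this).1.symm
        have hw : w.isSome = true := hv w (by simp)
        intro hcon
        rw [show ((i : Int) + 1) = ((i + 1 : Nat) : Int) from by push_cast; ring, this] at hcon
        rw [hcon.2] at hw
        simp at hw
    rw [bubbleA, dif_neg hguard]
    refine ⟨?_, fun _ _ _ => rfl⟩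
    rw [colFrom_cons g m.toNat i x hi, hhead, htail]
    simp
  | succ z ih =>
    intro g i hwf hi a vals hv hcol
    rw [colFrom_cons g m.toNat i x hi] at hcol
    have hhead : cellGet g ↑i ↑x = some a := (List.cons.injEq _ _ _ _).mp hcol |>.1
    have htail : colFrom g m.toNat (i + 1) x = List.replicate (z + 1) none ++ vals :=
      (List.cons.injEq _ _ _ _).mp hcol |>.2
    have hlen := length_colFrom g m.toNat (i + 1) x
    rw [htail] at hlen
    simp at hlen
    have hi1 : i + 1 < m.toNat := by omega
    have hnext : cellGet g ↑(i + 1) ↑x = none := by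
      have := colFrom_cons g m.toNat (i + 1) x hi1
      rw [htail, List.replicate_succ, List.cons_append] at this
      exact ((List.cons.injEq _ _ _ _).mp this).1.symm
    have htail2 : colFrom g m.toNat (i + 2) x = List.replicate z none ++ vals := by
      have := colFrom_cons g m.toNat (i + 1) x hi1
      rw [htail, List.replicate_succ, List.cons_append] at this
      exact ((List.cons.injEq _ _ _ _).mp this).2.symm
    have hcast1 : ((i : Int) + 1) = ((i + 1 : Nat) : Int) := by push_cast; ring
    have hguard : ((↑i : Int) + 1 < m ∧ cellGet g (↑i + 1) ↑x = none) := by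
      rw [hcast1, hnext]
      constructor
      · omega
      · rfl
    rw [bubbleA, dif_pos hguard]
    set g2 := cellSet (cellSet g (↑i + 1) ↑x (cellGet g ↑i ↑x)) ↑i ↑x none with hg2
    have hrow_i : i < g.length := by have := hwf.1; omega
    have hrow_i1 : i + 1 < g.length := by have := hwf.1; omega
    have hcol_i : x < (g.getD i []).length := by have := hwf.2 i (by omega); omega
    have hcol_i1 : x < (g.getD (i + 1) []).length := by have := hwf.2 (i + 1) hi1; omega
    have hwf2 : WF m n g2 := WF_of_dims m n g _ hwf
      (dims_trans (dims_cellSet _ _ _ _) (dims_cellSet _ _ _ _))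
    -- cells of g2
    have hg2_i : cellGet g2 ↑i ↑x = none := by
      rw [hg2, hcast1]
      exact cellGet_cellSet_self _ i x none (by simpa [length_cellSet] using hrow_i)
        (by rw [rowlen_cellSet]; exact hcol_i)
    have hg2_i1 : cellGet g2 ↑(i + 1) ↑x = some a := by
      rw [hg2, hcast1]
      rw [cellGet_cellSet_ne _ i x (i + 1) x none (Or.inl (by omega))]
      rw [hhead]
      exact cellGet_cellSet_self g (i + 1) x (some a) hrow_i1 hcol_i1
    have hg2_other : ∀ (y' x' : Nat), (y' ≠ i ∧ y' ≠ i + 1) ∨ x' ≠ x →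
        cellGet g2 ↑y' ↑x' = cellGet g ↑y' ↑x' := by
      intro y' x' hc
      rw [hg2, hcast1]
      rw [cellGet_cellSet_ne _ i x y' x' none (by tauto)]
      rw [cellGet_cellSet_ne g (i + 1) x y' x' _ (by tauto)]
    have hcol2 : colFrom g2 m.toNat (i + 1) x = some a :: (List.replicate z none ++ vals) := by
      rw [colFrom_cons g2 m.toNat (i + 1) x hi1, hg2_i1]
      congr 1
      rw [← htail2]
      exact colFrom_congr g2 g m.toNat (i + 2) x
        (fun y hy1 hy2 => hg2_other y x (Or.inl ⟨by omega, by omega⟩))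
    obtain ⟨IH1, IH2⟩ := ih g2 (i + 1) hwf2 hi1 a vals hv hcol2
    rw [← hcast1] at IH1 IH2
    constructor
    · rw [colFrom_cons _ m.toNat i x hi]
      have : cellGet (bubbleA m g2 ↑x (↑i + 1)) ↑i ↑x = none := by
        rw [hcast1] at IH2 ⊢
        rw [IH2 i x (Or.inl (by omega))]
        exact hg2_i
      rw [this]
      rw [show colFrom (bubbleA m g2 ↑x (↑i + 1)) m.toNat (i + 1) x
          = List.replicate z none ++ some a :: vals from IH1]
      simp [List.replicate_succ]
    · intro y' x' hc
      rw [hcast1] at IH2 ⊢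
      rw [IH2 y' x' (hc.imp (fun h => by omega) id)]
      exact hg2_other y' x' (hc.imp (fun h => ⟨by omega, by omega⟩) id)

-- one cell of A's gravity row scan: skip-or-bubble settles rows k.. of column x --
theorem step_col (m n : Int) (hm1 : 1 ≤ m) (x k : Nat) (hxn : x < n.toNat) (hk : k < m.toNat)
    (g : List (List (Option Char))) (hwf : WF m n g)
    (hsuf : IsComp (colFrom g m.toNat (k + 1) x)) :
    colFrom (if cellGet g ↑k ↑x = none then g else bubbleA m g ↑x ↑k) m.toNat k x
      = compactC (colFrom g m.toNat k x) ∧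
    (∀ (y' x' : Nat), (y' < k ∨ x' ≠ x) →
      cellGet (if cellGet g ↑k ↑x = none then g else bubbleA m g ↑x ↑k) ↑y' ↑x' = cellGet g ↑y' ↑x') ∧
    Dims g (if cellGet g ↑k ↑x = none then g else bubbleA m g ↑x ↑k) := by
  obtain ⟨z, vals, hshape, hv⟩ := hsuf
  have hcol := colFrom_cons g m.toNat k x hk
  rw [hshape] at hcol
  by_cases hc : cellGet g ↑k ↑x = none
  · rw [if_pos hc]
    refine ⟨?_, fun _ _ _ => rfl, dims_refl g⟩
    rw [hcol, hc, compactC_cons_none, compactC_shape z vals hv]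
  · rw [if_neg hc]
    obtain ⟨a, ha⟩ := Option.ne_none_iff_exists'.mp hc
    rw [ha] at hcol
    obtain ⟨B1, B2⟩ := bubble_col m n hm1 x hxn z g k hwf hk a vals hv hcol
    exact ⟨by rw [B1, hcol, compactC_some_shape a z vals hv], B2, dims_bubble m g ↑x ↑k⟩

-- the full inner x-scan of one gravity row ------------------------------------
theorem row_pass (m n : Int) (hm1 : 1 ≤ m) (k : Nat) (hk : k < m.toNat) :
    ∀ (xs : List Int), xs.Nodup → (∀ x ∈ xs, 0 ≤ x ∧ x < n) →
    ∀ g, WF m n g → (∀ x' < n.toNat, IsComp (colFrom g m.toNat (k + 1) x')) →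
    (∀ (y' x' : Nat), (y' < k ∨ ((x' : Int)) ∉ xs) →
      cellGet (xs.foldl (fun g x => if cellGet g ↑k x = none then g else bubbleA m g x ↑k) g) ↑y' ↑x'
        = cellGet g ↑y' ↑x') ∧
    (∀ x' : Nat, x' < n.toNat → ((x' : Int)) ∈ xs →
      colFrom (xs.foldl (fun g x => if cellGet g ↑k x = none then g else bubbleA m g x ↑k) g) m.toNat k x'
        = compactC (colFrom g m.toNat k x')) ∧
    Dims g (xs.foldl (fun g x => if cellGet g ↑k x = none then g else bubbleA m g x ↑k) g) := by
  intro xs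
  induction xs with
  | nil =>
    intro _ _ g _ _
    exact ⟨fun _ _ _ => rfl, fun _ _ h => absurd h List.not_mem_nil, dims_refl g⟩
  | cons x0 t ih =>
    intro hnd hbnd g hwf hsuf
    have hx0 := hbnd x0 (by simp)
    have hX : x0 = ((x0.toNat : Nat) : Int) := by omega
    have hXn : x0.toNat < n.toNat := by omega
    rw [hX] at hnd hbnd ⊢
    have hfold : ((↑x0.toNat : Int) :: t).foldl (fun g x => if cellGet g ↑k x = none then g else bubbleA m g x ↑k) g
        = t.foldl (fun g x => if cellGet g ↑k x = none then g else bubbleA m g x ↑k)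
          (if cellGet g ↑k (↑x0.toNat : Int) = none then g else bubbleA m g ↑x0.toNat ↑k) := rfl
    obtain ⟨S1, S2, S3⟩ := step_col m n hm1 x0.toNat k hXn hk g hwf (hsuf x0.toNat hXn)
    set g1 := if cellGet g ↑k (↑x0.toNat : Int) = none then g else bubbleA m g ↑x0.toNat ↑k with hg1
    have hwf1 : WF m n g1 := WF_of_dims m n g g1 hwf S3
    have hsuf1 : ∀ x' < n.toNat, IsComp (colFrom g1 m.toNat (k + 1) x') := by
      intro x' hx'
      by_cases he : x' = x0.toNat
      · rw [he]
        have := IsComp_compactC (colFrom g m.toNat k x0.toNat)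
        rw [← S1, colFrom_cons g1 m.toNat k x0.toNat hk] at this
        exact IsComp_tail this
      · rw [colFrom_congr g1 g m.toNat (k + 1) x' (fun y hy1 hy2 => S2 y x' (Or.inr he))]
        exact hsuf x' hx'
    obtain ⟨I1, I2, I3⟩ := ih (List.nodup_cons.mp hnd).2 (fun x hx => hbnd x (by simp [hx])) g1 hwf1 hsuf1
    have hx0nt : (↑x0.toNat : Int) ∉ t := (List.nodup_cons.mp hnd).1
    refine ⟨?_, ?_, ?_⟩
    · intro y' x' hc
      rw [hfold, I1 y' x' (hc.imp id (fun h hm' => h (List.mem_cons_of_mem _ hm')))]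
      exact S2 y' x' (hc.imp id (fun h he => h (by rw [he]; exact List.mem_cons_self ..)))
    · intro x' hx' hmem
      rw [hfold]
      by_cases he : x' = x0.toNat
      · rw [he]
        rw [colFrom_congr _ g1 m.toNat k x0.toNat (fun y hy1 hy2 => I1 y x0.toNat (Or.inr hx0nt))]
        exact S1
      · have hmt : ((x' : Int)) ∈ t := by
          rcases List.mem_cons.mp hmem with h | h
          · exact absurd (by exact_mod_cast h) he
          · exact h
        rw [I2 x' hx' hmt]
        congr 1
        exact colFrom_congr g1 g m.toNat k x' (fun y hy1 hy2 => S2 y x' (Or.inr he))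
    · exact dims_trans S3 I3

-- the outer reversed row scan of A's gravity ----------------------------------
theorem outer_pass (m n : Int) (hm1 : 1 ≤ m) :
    ∀ (K : Nat), K ≤ m.toNat →
    ∀ g, WF m n g → (∀ x < n.toNat, IsComp (colFrom g m.toNat K x)) →
    (∀ x < n.toNat,
      colFrom (((List.range K).reverse.map (fun (k : Nat) => (k : Int))).foldl
          (fun g y => ((PySem.List.pyRange 0 n 1).reverse).foldl
            (fun g x => if cellGet g y x = none then g else bubbleA m g x y) g) g) m.toNat 0 x
        = compactC (colFrom g m.toNat 0 x)) ∧
    Dims g (((List.range K).reverse.map (fun (k : Nat) => (k : Int))).foldl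
          (fun g y => ((PySem.List.pyRange 0 n 1).reverse).foldl
            (fun g x => if cellGet g y x = none then g else bubbleA m g x y) g) g) := by
  intro K
  induction K with
  | zero =>
    intro _ g _ hcomp
    exact ⟨fun x hx => (compactC_eq_of_IsComp (hcomp x hx)).symm, dims_refl g⟩
  | succ K ih =>
    intro hK g hwf hcomp
    have hlist : ((List.range (K + 1)).reverse.map (fun (k : Nat) => (k : Int)))
        = (K : Int) :: (List.range K).reverse.map (fun (k : Nat) => (k : Int)) := by
      rw [List.range_succ, List.reverse_append]
      rfl
    rw [hlist]
    rw [List.foldl_cons]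
    have hxs_nd : ((PySem.List.pyRange 0 n 1).reverse).Nodup :=
      List.nodup_reverse.mpr (PySem.List.nodup_pyRange_one 0 n)
    have hxs_bnd : ∀ x ∈ (PySem.List.pyRange 0 n 1).reverse, 0 ≤ x ∧ x < n := by
      intro x hx
      rw [List.mem_reverse, PySem.List.mem_pyRange_one] at hx
      exact hx
    obtain ⟨R1, R2, R3⟩ := row_pass m n hm1 K (by omega) ((PySem.List.pyRange 0 n 1).reverse)
      hxs_nd hxs_bnd g hwf hcomp
    set g1 := ((PySem.List.pyRange 0 n 1).reverse).foldl
      (fun g x => if cellGet g ↑K x = none then g else bubbleA m g x ↑K) g with hg1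
    have hwf1 : WF m n g1 := WF_of_dims m n g g1 hwf R3
    have hcomp1 : ∀ x < n.toNat, IsComp (colFrom g1 m.toNat K x) := by
      intro x hx
      rw [R2 x hx (by rw [List.mem_reverse, PySem.List.mem_pyRange_one]; omega)]
      exact IsComp_compactC _
    obtain ⟨I1, I2⟩ := ih (by omega) g1 hwf1 hcomp1
    refine ⟨?_, dims_trans R3 I2⟩
    intro x hx
    rw [I1 x hx]
    have hsplit1 : colFrom g1 m.toNat 0 x = colFrom g1 K 0 x ++ colFrom g1 m.toNat K x :=
      colFrom_split g1 m.toNat K x (by omega)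
    have hsplit0 : colFrom g m.toNat 0 x = colFrom g K 0 x ++ colFrom g m.toNat K x :=
      colFrom_split g m.toNat K x (by omega)
    have hpre : colFrom g1 K 0 x = colFrom g K 0 x :=
      colFrom_congr g1 g K 0 x (fun y hy1 hy2 => R1 y x (Or.inl hy2))
    rw [hsplit1, hpre, R2 x hx (by rw [List.mem_reverse, PySem.List.mem_pyRange_one]; omega)]
    rw [compactC_append_compactC, ← hsplit0]

-- the marked-and-zeroed column, as B sees it ----------------------------------
def colZ (g : List (List (Option Char))) (marks : List (Int × Int)) (M x : Nat) :
    List (Option Char) :=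
  (List.range M).map (fun (y : Nat) =>
    if ((y : Int), (x : Int)) ∈ marks then none else cellGet g ((y : Int)) ((x : Int)))

theorem gravity_cols (m n : Int) (hm : 2 ≤ m) (g : List (List (Option Char))) (hwf : WF m n g) :
    ∀ x < n.toNat, colFrom (gravityA m n g) m.toNat 0 x = compactC (colFrom g m.toNat 0 x) := by
  have hlist : (PySem.List.pyRange 0 (m - 1) 1).reverse
      = (List.range (m.toNat - 1)).reverse.map (fun (k : Nat) => (k : Int)) := by
    rw [PySem.List.pyRange_one, List.map_reverse]
    congr 1
    rw [show (m - 1 - 0).toNat = m.toNat - 1 from by omega]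
    exact List.map_congr_left (fun k _ => by omega)
  unfold gravityA
  rw [hlist]
  exact (outer_pass m n (by omega) (m.toNat - 1) (by omega) g hwf
    (fun x hx => IsComp_short _ (by rw [length_colFrom]; omega))).1

-- B's per-column write loop --------------------------------------------------
theorem write_fold (m n : Int) (x0 : Nat) (hx0 : x0 < n.toNat) (v : Int → Option Char) :
    ∀ (ys : List Int), ys.Nodup → (∀ y ∈ ys, 0 ≤ y ∧ y < m) →
    ∀ h, WF m n h →
    (∀ (y' x' : Nat), (x' ≠ x0 ∨ ((y' : Int)) ∉ ys) →
      cellGet (ys.foldl (fun h y => cellSet h y ↑x0 (v y)) h) ↑y' ↑x' = cellGet h ↑y' ↑x') ∧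
    (∀ y' : Nat, ((y' : Int)) ∈ ys →
      cellGet (ys.foldl (fun h y => cellSet h y ↑x0 (v y)) h) ↑y' ↑x0 = v ↑y') ∧
    Dims h (ys.foldl (fun h y => cellSet h y ↑x0 (v y)) h) := by
  intro ys
  induction ys with
  | nil =>
    intro _ _ h _
    exact ⟨fun _ _ _ => rfl, fun _ hmem => absurd hmem List.not_mem_nil, dims_refl h⟩
  | cons y0 t ih =>
    intro hnd hbnd h hwf
    have hy0 := hbnd y0 (by simp)
    have hY : y0 = ((y0.toNat : Nat) : Int) := by omega
    have hYm : y0.toNat < m.toNat := by omega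
    rw [hY] at hnd hbnd ⊢
    have hfold : ((↑y0.toNat : Int) :: t).foldl (fun h y => cellSet h y ↑x0 (v y)) h
        = t.foldl (fun h y => cellSet h y ↑x0 (v y)) (cellSet h ↑y0.toNat ↑x0 (v ↑y0.toNat)) := rfl
    set h1 := cellSet h (↑y0.toNat : Int) ↑x0 (v ↑y0.toNat) with hh1
    have hd1 : Dims h h1 := dims_cellSet h _ _ _
    have hwf1 : WF m n h1 := WF_of_dims m n h h1 hwf hd1
    obtain ⟨I1, I2, I3⟩ := ih (List.nodup_cons.mp hnd).2 (fun y hy => hbnd y (by simp [hy])) h1 hwf1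
    have hy0nt : (↑y0.toNat : Int) ∉ t := (List.nodup_cons.mp hnd).1
    refine ⟨?_, ?_, ?_⟩
    · intro y' x' hc
      rw [hfold, I1 y' x' (hc.imp id (fun hmem hm' => hmem (List.mem_cons_of_mem _ hm')))]
      rw [hh1]
      apply cellGet_cellSet_ne
      rcases hc with hx' | hy'
      · exact Or.inr hx'
      · exact Or.inl (fun he => hy' (by rw [he]; exact List.mem_cons_self ..))
    · intro y' hmem
      rw [hfold]
      by_cases he : y' = y0.toNat
      · rw [he]
        rw [I1 y0.toNat x0 (Or.inr hy0nt), hh1]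
        exact cellGet_cellSet_self h y0.toNat x0 _ (by have := hwf.1; omega)
          (by have := hwf.2 y0.toNat hYm; omega)
      · have hmt : ((y' : Int)) ∈ t := by
          rcases List.mem_cons.mp hmem with hcon | hcon
          · exact absurd (by exact_mod_cast hcon) he
          · exact hcon
        rw [I2 y' hmt]
    · exact dims_trans hd1 I3

-- one column of B's pass, cell by cell ----------------------------------------
theorem settleCol_cells (m n : Int) (hm : 2 ≤ m) (marks : PySem.Set (Int × Int))
    (x0 : Nat) (hx0 : x0 < n.toNat) (g : List (List (Option Char))) (hwf : WF m n g) :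
    (∀ (y' x' : Nat), x' ≠ x0 → cellGet (settleColB m marks g ↑x0) ↑y' ↑x' = cellGet g ↑y' ↑x') ∧
    (∀ y' : Nat, y' < m.toNat →
      cellGet (settleColB m marks g ↑x0) ↑y' ↑x0 = (compactC (colZ g marks m.toNat x0)).getD y' none) ∧
    Dims g (settleColB m marks g ↑x0) := by
  have hM : ((m.toNat : Nat) : Int) = m := by omega
  set col := ((PySem.List.pyRange 0 m 1).filter (fun y =>
      !(PySem.Set.contains marks (y, (x0 : Int))) && !(cellGet g y ↑x0 == none))).map
      (fun y => cellGet g y (x0 : Int)) with hcol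
  set v : Int → Option Char := fun y =>
    if (m - (col.length : Int)) ≤ y then PySem.List.pyGetD col (y - (m - (col.length : Int))) none
    else none with hv
  have hset : settleColB m marks g ↑x0
      = (PySem.List.pyRange 0 m 1).foldl (fun h y => cellSet h y ↑x0 (v y)) g := by
    rw [hv, hcol]
    rfl
  have hrange : PySem.List.pyRange 0 m 1 = (List.range m.toNat).map (fun (k : Nat) => (k : Int)) := by
    rw [PySem.List.pyRange_one]
    rw [show (m - 0).toNat = m.toNat from by omega]
    exact List.map_congr_left (fun k _ => by omega)
  -- the collected column equals the non-zero part of the marked column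
  have hfilt : (List.range m.toNat).filter
        ((fun y => !(PySem.Set.contains marks (y, (x0 : Int))) && !(cellGet g y ↑x0 == none))
          ∘ (fun (k : Nat) => (k : Int)))
      = (List.range m.toNat).filter (Option.isSome ∘ (fun (y : Nat) =>
          if ((y : Int), (x0 : Int)) ∈ (marks : List (Int × Int)) then none
          else cellGet g ((y : Int)) ((x0 : Int)))) := by
    refine List.filter_congr (fun y _ => ?_)
    by_cases hmk : ((y : Int), (x0 : Int)) ∈ (marks : List (Int × Int))
    · have hb : PySem.Set.contains marks ((y : Int), (x0 : Int)) = true :=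
        (PySem.Set.contains_iff marks _).mpr hmk
      simp [hb, hmk]
    · have hb : PySem.Set.contains marks ((y : Int), (x0 : Int)) = false := by
        rw [← Bool.not_eq_true]
        exact fun h => hmk ((PySem.Set.contains_iff marks _).mp h)
      cases hcell : cellGet g (y : Int) (x0 : Int) <;> simp [hb, hmk, hcell]
  have hcoleq : col = (colZ g marks m.toNat x0).filter Option.isSome := by
    rw [hcol, colZ, hrange, List.filter_map, List.map_map, List.filter_map, hfilt]
    refine List.map_congr_left (fun y hy => ?_)
    have hmem := List.of_mem_filter hy
    simp only [Function.comp] at hmem ⊢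
    by_cases hmk : ((y : Int), (x0 : Int)) ∈ (marks : List (Int × Int))
    · rw [if_pos hmk] at hmem
      simp at hmem
    · rw [if_neg hmk]
  have hLle : (colZ g marks m.toNat x0).length = m.toNat := by
    simp [colZ]
  have hflen : ((colZ g marks m.toNat x0).filter Option.isSome).length ≤ m.toNat := by
    have h1 := List.length_filter_le Option.isSome (colZ g marks m.toNat x0)
    omega
  obtain ⟨W1, W2, W3⟩ := write_fold m n x0 hx0 v (PySem.List.pyRange 0 m 1)
    (PySem.List.nodup_pyRange_one 0 m)
    (fun y hy => by rw [PySem.List.mem_pyRange_one] at hy; omega) g hwf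
  rw [hset]
  refine ⟨fun y' x' hne => W1 y' x' (Or.inl hne), ?_, W3⟩
  intro y' hy'
  rw [W2 y' (by rw [PySem.List.mem_pyRange_one]; omega)]
  -- compare the written value with the settled column
  set vals := (colZ g marks m.toNat x0).filter Option.isSome with hvals
  have hcl : col.length = vals.length := by rw [hcoleq]
  have hrep : (List.replicate (m.toNat - vals.length) (none : Option Char)).length
      = m.toNat - vals.length := List.length_replicate
  have hcompact : compactC (colZ g marks m.toNat x0)
      = List.replicate (m.toNat - vals.length) none ++ vals := by
    rw [compactC, ← hvals, hLle]
  rw [hcompact, hv]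
  simp only []
  by_cases hcase : y' < m.toNat - vals.length
  · rw [if_neg (by omega)]
    rw [List.getD_append _ _ _ _ (by rw [hrep]; omega), List.getD_replicate _ (by omega)]
  · rw [if_pos (by omega)]
    rw [List.getD_append_right _ _ _ _ (by rw [hrep]; omega), hrep]
    have hidx : 0 ≤ (y' : Int) - (m - (col.length : Int)) := by omega
    have hidx2 : ((y' : Int) - (m - (col.length : Int))).toNat = y' - (m.toNat - vals.length) := by
      omega
    rw [PySem.List.pyGetD_of_nonneg _ _ hidx, hidx2, hcoleq]

-- B's whole pass, cell by cell ------------------------------------------------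
theorem compact_cells (m n : Int) (hm : 2 ≤ m) (marks : PySem.Set (Int × Int)) :
    ∀ (xs : List Int), xs.Nodup → (∀ x ∈ xs, 0 ≤ x ∧ x < n) →
    ∀ g, WF m n g →
    (∀ (y' x' : Nat), ((x' : Int)) ∉ xs →
      cellGet (xs.foldl (settleColB m marks) g) ↑y' ↑x' = cellGet g ↑y' ↑x') ∧
    (∀ x' : Nat, x' < n.toNat → ((x' : Int)) ∈ xs → ∀ y' : Nat, y' < m.toNat →
      cellGet (xs.foldl (settleColB m marks) g) ↑y' ↑x'
        = (compactC (colZ g marks m.toNat x')).getD y' none) ∧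
    Dims g (xs.foldl (settleColB m marks) g) := by
  intro xs
  induction xs with
  | nil =>
    intro _ _ g _
    exact ⟨fun _ _ _ => rfl, fun _ _ hmem => absurd hmem List.not_mem_nil, dims_refl g⟩
  | cons x0 t ih =>
    intro hnd hbnd g hwf
    have hx0 := hbnd x0 (by simp)
    have hX : x0 = ((x0.toNat : Nat) : Int) := by omega
    have hXn : x0.toNat < n.toNat := by omega
    rw [hX] at hnd hbnd ⊢
    have hfold : ((↑x0.toNat : Int) :: t).foldl (settleColB m marks) g
        = t.foldl (settleColB m marks) (settleColB m marks g ↑x0.toNat) := rfl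
    obtain ⟨S1, S2, S3⟩ := settleCol_cells m n hm marks x0.toNat hXn g hwf
    set g1 := settleColB m marks g (↑x0.toNat : Int) with hg1
    have hwf1 : WF m n g1 := WF_of_dims m n g g1 hwf S3
    obtain ⟨I1, I2, I3⟩ := ih (List.nodup_cons.mp hnd).2 (fun x hx => hbnd x (by simp [hx])) g1 hwf1
    have hx0nt : (↑x0.toNat : Int) ∉ t := (List.nodup_cons.mp hnd).1
    refine ⟨?_, ?_, ?_⟩
    · intro y' x' hmem
      rw [hfold, I1 y' x' (fun hm' => hmem (List.mem_cons_of_mem _ hm'))]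
      exact S1 y' x' (fun he => hmem (by rw [he]; exact List.mem_cons_self ..))
    · intro x' hx' hmem y' hy'
      rw [hfold]
      by_cases he : x' = x0.toNat
      · rw [he]
        rw [I1 y' x0.toNat hx0nt]
        exact S2 y' hy'
      · have hmt : ((x' : Int)) ∈ t := by
          rcases List.mem_cons.mp hmem with hcon | hcon
          · exact absurd (by exact_mod_cast hcon) he
          · exact hcon
        rw [I2 x' hx' hmt y' hy']
        have hcz : colZ g1 marks m.toNat x' = colZ g marks m.toNat x' := by
          unfold colZ
          exact List.map_congr_left (fun y hy => by
            by_cases hmk : ((y : Int), (x' : Int)) ∈ (marks : List (Int × Int))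
            · simp [hmk]
            · simp only [if_neg hmk]
              exact S1 y x' he)
        rw [hcz]
    · exact dims_trans S3 I3

-- the main round/loop equivalence (to be discharged) -------------------------
theorem gridRound_eq (m n : Int) (g g' : List (List (Option Char))) (s : PySem.Set (Int × Int))
    (hm : 2 ≤ m) (hn : 2 ≤ n) (hwf : WF m n g) (hwf' : WF m n g') (hbox : BoxEq m n g g')
    (hs : ∀ p ∈ s, 0 ≤ p.1 ∧ p.1 < m ∧ 0 ≤ p.2 ∧ p.2 < n) :
    BoxEq m n (gravityA m n (zeroOutA g s)) (compactB m n g' s) := by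
  intro y hy x hx
  have hwfh : WF m n (zeroOutA g s) := WF_of_dims m n g _ hwf (dims_zeroOut g s)
  have hA : cellGet (gravityA m n (zeroOutA g s)) ↑y ↑x
      = (compactC (colFrom (zeroOutA g s) m.toNat 0 x)).getD y none := by
    rw [← gravity_cols m n hm (zeroOutA g s) hwfh x hx]
    exact (colFrom_getD (gravityA m n (zeroOutA g s)) m.toNat x y hy).symm
  have hcolh : colFrom (zeroOutA g s) m.toNat 0 x = colZ g s m.toNat x := by
    unfold colFrom colZ
    rw [Nat.sub_zero, ← List.range_eq_range']
    refine List.map_congr_left (fun yy hyy => ?_)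
    rw [List.mem_range] at hyy
    exact zeroOut_cells m n s hs g hwf yy x hyy hx
  have hcolz : colZ g s m.toNat x = colZ g' s m.toNat x := by
    unfold colZ
    refine List.map_congr_left (fun yy hyy => ?_)
    rw [List.mem_range] at hyy
    by_cases hmk : ((yy : Int), (x : Int)) ∈ (s : List (Int × Int))
    · rw [if_pos hmk, if_pos hmk]
    · rw [if_neg hmk, if_neg hmk]
      exact hbox yy hyy x hx
  have hB : cellGet (compactB m n g' s) ↑y ↑x = (compactC (colZ g' s m.toNat x)).getD y none := by
    have hxs_nd : (PySem.List.pyRange 0 n 1).Nodup := PySem.List.nodup_pyRange_one 0 n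
    have hxs_bnd : ∀ x' ∈ PySem.List.pyRange 0 n 1, 0 ≤ x' ∧ x' < n := by
      intro x' hx'
      rw [PySem.List.mem_pyRange_one] at hx'
      exact hx'
    exact (compact_cells m n hm s (PySem.List.pyRange 0 n 1) hxs_nd hxs_bnd g' hwf').2.1
      x hx (by rw [PySem.List.mem_pyRange_one]; omega) y hy
  rw [hA, hcolh, hcolz, hB]

theorem WF_gravity (m n : Int) (g : List (List (Option Char))) (s : PySem.Set (Int × Int))
    (hwf : WF m n g) : WF m n (gravityA m n (zeroOutA g s)) :=
  WF_of_dims m n g _ hwf (dims_trans (dims_zeroOut g s) (dims_gravity m n _))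

theorem WF_compact (m n : Int) (g : List (List (Option Char))) (s : PySem.Set (Int × Int))
    (hwf : WF m n g) : WF m n (compactB m n g s) :=
  WF_of_dims m n g _ hwf (dims_compact m n g s)

theorem marks_inBox (m n : Int) (g : List (List (Option Char))) :
    ∀ p ∈ detectA m n g, 0 ≤ p.1 ∧ p.1 < m ∧ 0 ≤ p.2 ∧ p.2 < n := by
  unfold detectA
  refine List.foldlRecOn (motive := fun (s : PySem.Set (Int × Int)) => ∀ p ∈ s, 0 ≤ p.1 ∧ p.1 < m ∧ 0 ≤ p.2 ∧ p.2 < n)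
    _ _ (fun p hp => absurd hp List.not_mem_nil) ?_
  intro s hs y hy
  refine List.foldlRecOn (motive := fun (s : PySem.Set (Int × Int)) => ∀ p ∈ s, 0 ≤ p.1 ∧ p.1 < m ∧ 0 ≤ p.2 ∧ p.2 < n)
    _ _ hs ?_
  intro s' hs' x hx
  rw [PySem.List.mem_pyRange_one] at hy hx
  intro p hp
  split at hp
  · exact hs' p hp
  · unfold checkA at hp
    split at hp
    · simp only [PySem.Set.mem_add] at hp
      rcases hp with (((hp | rfl) | rfl) | rfl) | rfl
      · exact hs' p hp
      all_goals (refine ⟨?_, ?_, ?_, ?_⟩ <;> dsimp only <;> omega)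
    · exact hs' p hp

theorem loop_eq (m n : Int) (hm : 2 ≤ m) (hn : 2 ≤ n) :
    ∀ (f : Nat) (g g' : List (List (Option Char))) (acc : Int),
      WF m n g → WF m n g' → BoxEq m n g g' → loopA m n f g acc = loopB m n f g' acc := by
  intro f
  induction f with
  | zero => intro g g' acc _ _ _; rfl
  | succ f ih =>
    intro g g' acc hwf hwf' hbox
    have hdet : detectA m n g = detectB m n g' := detect_congr m n g g' hbox hm hn
    show (let s := detectA m n g;
      if PySem.Set.len s = 0 then acc else loopA m n f (gravityA m n (zeroOutA g s)) (acc + PySem.Set.len s)) =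
      (let s := detectB m n g';
      if PySem.Set.len s = 0 then acc else loopB m n f (compactB m n g' s) (acc + PySem.Set.len s))
    rw [← hdet]
    by_cases hz : PySem.Set.len (detectA m n g) = 0
    · rw [if_pos hz, if_pos hz]
    · rw [if_neg hz, if_neg hz]
      exact ih (gravityA m n (zeroOutA g (detectA m n g))) (compactB m n g' (detectA m n g)) _
        (WF_gravity m n g _ hwf) (WF_compact m n g' _ hwf')
        (gridRound_eq m n g g' _ hm hn hwf hwf' hbox (marks_inBox m n g))


theorem solution_spec : Claim_equal_solution := by
  intro m n board _ hpre
  unfold Spec_solution solution solution_alt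
  by_cases hmn : 2 ≤ m ∧ 2 ≤ n
  · -- main case
    apply loop_eq m n hmn.1 hmn.2
    · constructor
      · simp only [List.length_map]
        have := hpre.1
        omega
      · intro y hy
        have hyb : y < board.length := by
          have := hpre.1; omega
        have : (board.map (fun r => r.toList.map some)).getD y [] = board[y].toList.map some := by
          simp [List.getD, List.getElem?_map, List.getElem?_eq_getElem hyb]
        rw [this]
        have hmem : board[y] ∈ board.take m.toNat := by
          rw [List.mem_take_iff_getElem]
          exact ⟨y, by omega, by simp [List.getElem_take]⟩
        have := hpre.2 hmn _ hmem
        simp only [List.length_map]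
        omega
    · constructor
      · simp only [List.length_map]; have := hpre.1; omega
      · intro y hy
        have hyb : y < board.length := by have := hpre.1; omega
        have : (board.map (fun r => r.toList.map some)).getD y [] = board[y].toList.map some := by
          simp [List.getD, List.getElem?_map, List.getElem?_eq_getElem hyb]
        rw [this]
        have hmem : board[y] ∈ board.take m.toNat := by
          rw [List.mem_take_iff_getElem]
          exact ⟨y, by omega, by simp [List.getElem_take]⟩
        have := hpre.2 hmn _ hmem
        simp only [List.length_map]
        omega
    · intro y _ x _; rfl
  · -- degenerate: no 2×2 window is ever scanned, both return 0 at once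
    have hdeg : m ≤ 1 ∨ n ≤ 1 := by omega
    obtain ⟨hA, hB⟩ := detect_degenerate m n (board.map (fun r => r.toList.map some)) hdeg
    show loopA m n (m.toNat * n.toNat + 1) _ 0 = loopB m n (m.toNat * n.toNat + 1) _ 0
    rw [loopA, loopB, hA, hB]
    rfl
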